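-- pv_equiv track=rewrite | github.com/EffePen/advent-of-code | 2017/day_24/solver.py | longest_bridge
-- ===== SOURCE A (Python) =====
-- def longest_bridge(bridges, path=None, last_pins=0, tot_pins=0):
--     path = path or []
--     next_possible_bridges = [(b_idx, b, b_pins) for (b_idx, b, b_pins) in bridges
--                              if last_pins in b and b_idx not in path]
--     if not next_possible_bridges:
--         return len(path), tot_pins
--     else:
--         max_len = 0
--         max_pins = 0
--         for (b_idx, b, b_pins) in next_possible_bridges:
--             new_last_pins = b_pins - last_pins
--             new_bridge_len, new_tot_pins = longest_bridge(bridges, path=path + [b_idx], last_pins=new_last_pins, tot_pins=tot_pins + b_pins)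
--             if new_bridge_len > max_len:
--                 max_len = new_bridge_len
--                 max_pins = new_tot_pins
--             elif new_bridge_len == max_len:
--                 max_pins = max(max_pins, new_tot_pins)
--         return max_len, max_pins
-- ===== SOURCE B (Python) =====
-- def longest_bridge(bridges, path=None, last_pins=0, tot_pins=0):
--     # Iterative DFS with an explicit stack; keeps a running best (len, pins).
--     stack = [(list(path) if path else [], last_pins, tot_pins)]
--     best = None
--     while stack:
--         cur_path, last, tot = stack.pop()
--         succs = [(i, b, p) for (i, b, p) in bridges
--                  if last in b and i not in cur_path]
--         if succs:
--             for (i, _b, p) in reversed(succs):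
--                 stack.append((cur_path + [i], p - last, tot + p))
--         else:
--             cand = (len(cur_path), tot)
--             if best is None or cand > best:
--                 best = cand
--     return best
-- ===== Notes on version B (the rewrite author's own statement) =====
-- stated objective: alternative
-- what changed: The recursive DFS that combines children maxima on the way back up is replaced by an explicit-stack iterative DFS that pushes successor states and updates a single running lexicographic best (len, pins) at terminal states.
import Mathlib
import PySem

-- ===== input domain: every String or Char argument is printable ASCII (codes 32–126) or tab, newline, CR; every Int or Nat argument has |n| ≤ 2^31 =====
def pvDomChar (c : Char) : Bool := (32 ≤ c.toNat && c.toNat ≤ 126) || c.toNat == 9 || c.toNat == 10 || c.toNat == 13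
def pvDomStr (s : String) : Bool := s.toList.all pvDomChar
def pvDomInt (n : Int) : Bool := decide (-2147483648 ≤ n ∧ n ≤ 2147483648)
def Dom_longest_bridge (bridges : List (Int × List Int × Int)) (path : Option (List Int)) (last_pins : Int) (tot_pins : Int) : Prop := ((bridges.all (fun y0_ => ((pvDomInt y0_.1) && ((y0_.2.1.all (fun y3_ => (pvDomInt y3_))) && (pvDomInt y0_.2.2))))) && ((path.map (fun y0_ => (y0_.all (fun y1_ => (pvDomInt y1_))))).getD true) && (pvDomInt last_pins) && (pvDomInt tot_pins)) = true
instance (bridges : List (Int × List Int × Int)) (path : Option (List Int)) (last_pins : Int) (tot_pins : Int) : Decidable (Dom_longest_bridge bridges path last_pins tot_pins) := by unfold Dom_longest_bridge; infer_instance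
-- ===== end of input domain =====

-- B replaces A's recursive DFS (combining children maxima on return) by an explicit-stack
-- iterative DFS keeping one running lexicographic best at terminal states (objective: alternative).

-- weight used by both termination arguments: number of bridges whose index is not yet on the path
def lbW (bridges : List (Int × List Int × Int)) (path : List Int) : Nat :=
  (bridges.filter (fun t => decide (t.1 ∉ path))).length

theorem lb_filter_le {α : Type} (p q : α → Bool) (l : List α)
    (h : ∀ x ∈ l, p x = true → q x = true) :
    (l.filter p).length ≤ (l.filter q).length := by
  induction l with
  | nil => simp
  | cons a as ih =>
    have ih' := ih (fun x hx => h x (List.mem_cons_of_mem _ hx))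
    by_cases hp : p a = true
    · have hq := h a (List.mem_cons_self) hp
      simp [List.filter_cons, hp, hq]; omega
    · simp only [List.filter_cons]
      rw [Bool.not_eq_true] at hp
      rw [hp]
      by_cases hq : q a = true
      · simp [hq]; omega
      · rw [Bool.not_eq_true] at hq; rw [hq]; exact ih'

theorem lb_filter_lt {α : Type} (p q : α → Bool) (l : List α)
    (h : ∀ x ∈ l, q x = true → p x = true)
    (x : α) (hx : x ∈ l) (hpx : p x = true) (hqx : q x = false) :
    (l.filter q).length < (l.filter p).length := by
  induction l with
  | nil => cases hx
  | cons a as ih =>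
    have hmono : (as.filter q).length ≤ (as.filter p).length :=
      lb_filter_le q p as (fun y hy => h y (List.mem_cons_of_mem _ hy))
    rcases List.mem_cons.1 hx with rfl | hxas
    · simp only [List.filter_cons, hpx, hqx]
      simp; omega
    · have ih' := ih (fun y hy => h y (List.mem_cons_of_mem _ hy)) hxas
      by_cases hq : q a = true
      · have hp := h a (List.mem_cons_self) hq
        simp [List.filter_cons, hp, hq]; omega
      · rw [Bool.not_eq_true] at hq
        simp only [List.filter_cons, hq]
        by_cases hp : p a = true
        · simp [hp]; omega
        · rw [Bool.not_eq_true] at hp; rw [hp]; simpa using ih'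

theorem lbW_append_lt (bridges : List (Int × List Int × Int)) (path : List Int)
    (t : Int × List Int × Int) (ht : t ∈ bridges) (hnp : t.1 ∉ path) :
    lbW bridges (path ++ [t.1]) < lbW bridges path := by
  unfold lbW
  apply lb_filter_lt (fun s => decide (s.1 ∉ path)) (fun s => decide (s.1 ∉ path ++ [t.1]))
      bridges ?_ t ht (by simpa using hnp) (by simp)
  intro x _ hx
  simp only [decide_eq_true_eq] at hx ⊢
  intro hmem
  exact hx (by simp [hmem])


theorem lbA_dec (bridges : List (Int × List Int × Int)) (path : List Int) (last_pins : Int)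
    (t : Int × List Int × Int)
    (hm : t ∈ (List.filter (fun (x : { s : Int × List Int × Int // s ∈ bridges }) =>
      decide (last_pins ∈ x.1.2.1) && decide (x.1.1 ∉ path)) bridges.attach).unattach) :
    lbW bridges (path ++ [t.1]) < lbW bridges path := by
  simp only [List.mem_unattach, List.mem_filter, List.mem_attach, true_and,
    Bool.and_eq_true, decide_eq_true_eq] at hm
  obtain ⟨hb, _, hnp⟩ := hm
  exact lbW_append_lt bridges path t hb hnp

-- ===== PORT A =====
def longest_bridge_rec (bridges : List (Int × List Int × Int)) (path : List Int)
    (last_pins : Int) (tot_pins : Int) : Int × Int :=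
  let next := bridges.filter (fun t => decide (last_pins ∈ t.2.1) && decide (t.1 ∉ path))
  if next = [] then ((path.length : Int), tot_pins)
  else
    next.attach.foldl (fun acc t =>
      let r := longest_bridge_rec bridges (path ++ [t.1.1]) (t.1.2.2 - last_pins) (tot_pins + t.1.2.2)
      if r.1 > acc.1 then r
      else if r.1 = acc.1 then (acc.1, max acc.2 r.2)
      else acc)
      ((0 : Int), (0 : Int))
termination_by lbW bridges path
decreasing_by
  exact lbA_dec bridges path last_pins t.1 t.2

def longest_bridge (bridges : List (Int × List Int × Int)) (path : Option (List Int))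
    (last_pins : Int) (tot_pins : Int) : Int × Int :=
  longest_bridge_rec bridges (path.getD []) last_pins tot_pins

-- ===== PORT B =====
def lbFact (bridges : List (Int × List Int × Int)) (s : List Int × Int × Int) : Nat :=
  Nat.factorial (lbW bridges s.1 + 1)

def lbMeasure (bridges : List (Int × List Int × Int)) (stack : List (List Int × Int × Int)) : Nat :=
  (stack.map (lbFact bridges)).sum

theorem lb_children_lt (bridges : List (Int × List Int × Int)) (cur_path : List Int)
    (last tot : Int) :
    lbMeasure bridges
      ((bridges.filter (fun t => decide (last ∈ t.2.1) && decide (t.1 ∉ cur_path))).map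
        (fun t => (cur_path ++ [t.1], t.2.2 - last, tot + t.2.2)))
      < Nat.factorial (lbW bridges cur_path + 1) := by
  set succs := bridges.filter (fun t => decide (last ∈ t.2.1) && decide (t.1 ∉ cur_path)) with hsuccs
  set w := lbW bridges cur_path with hw
  have hbound : ∀ x ∈ (succs.map (fun t => (cur_path ++ [t.1], t.2.2 - last, tot + t.2.2))).map
      (lbFact bridges), x ≤ Nat.factorial w := by
    intro x hx
    simp only [List.map_map, List.mem_map, Function.comp] at hx
    obtain ⟨t, htm, rfl⟩ := hx
    rw [hsuccs, List.mem_filter, Bool.and_eq_true] at htm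
    have hlt : lbW bridges (cur_path ++ [t.1]) < w :=
      lbW_append_lt bridges cur_path t htm.1 (by simpa using htm.2.2)
    show Nat.factorial (lbW bridges (cur_path ++ [t.1]) + 1) ≤ Nat.factorial w
    exact Nat.factorial_le (by omega)
  have hsum := List.sum_le_card_nsmul _ _ hbound
  have hlen : succs.length ≤ w := by
    rw [hw]; unfold lbW
    apply lb_filter_le
    intro x _ hx
    rw [Bool.and_eq_true] at hx
    exact hx.2
  have hfacpos : 0 < Nat.factorial w := Nat.factorial_pos w
  unfold lbMeasure
  calc (((succs.map (fun t => (cur_path ++ [t.1], t.2.2 - last, tot + t.2.2))).map (lbFact bridges)).sum)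
      ≤ ((succs.map (fun t => (cur_path ++ [t.1], t.2.2 - last, tot + t.2.2))).map (lbFact bridges)).length • Nat.factorial w := hsum
    _ = succs.length * Nat.factorial w := by simp [smul_eq_mul]
    _ ≤ w * Nat.factorial w := Nat.mul_le_mul_right _ hlen
    _ < (w + 1) * Nat.factorial w := (Nat.mul_lt_mul_right hfacpos).mpr (by omega)
    _ = Nat.factorial (w + 1) := by rw [Nat.factorial_succ]

theorem lbB_dec1 (bridges : List (Int × List Int × Int)) (cur_path : List Int) (last tot : Int)
    (rest : List (List Int × Int × Int)) :
    lbMeasure bridges rest < lbMeasure bridges ((cur_path, last, tot) :: rest) := by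
  have : 0 < lbFact bridges (cur_path, last, tot) := Nat.factorial_pos _
  simp only [lbMeasure, List.map_cons, List.sum_cons]
  omega

theorem lbB_dec2 (bridges : List (Int × List Int × Int)) (cur_path : List Int) (last tot : Int)
    (rest : List (List Int × Int × Int)) :
    lbMeasure bridges
      (((List.filter (fun (x : { s : Int × List Int × Int // s ∈ bridges }) =>
          decide (last ∈ x.1.2.1) && decide (x.1.1 ∉ cur_path)) bridges.attach).unattach).map
        (fun t => (cur_path ++ [t.1], t.2.2 - last, tot + t.2.2)) ++ rest)
      < lbMeasure bridges ((cur_path, last, tot) :: rest) := by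
  have hun : (List.filter (fun (x : { s : Int × List Int × Int // s ∈ bridges }) =>
      decide (last ∈ x.1.2.1) && decide (x.1.1 ∉ cur_path)) bridges.attach).unattach
      = List.filter (fun t => decide (last ∈ t.2.1) && decide (t.1 ∉ cur_path)) bridges := by
    rw [List.unattach_filter (g := fun t => decide (last ∈ t.2.1) && decide (t.1 ∉ cur_path))
        (hf := fun x h => rfl), List.unattach_attach]
  have h := lb_children_lt bridges cur_path last tot
  simp only [lbMeasure, List.map_append, List.sum_append, List.map_cons, List.sum_cons] at h ⊢
  rw [hun]
  have hf : lbFact bridges (cur_path, last, tot) = Nat.factorial (lbW bridges cur_path + 1) := rfl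
  omega

def longest_bridge_alt_go (bridges : List (Int × List Int × Int)) :
    List (List Int × Int × Int) → Option (Int × Int) → Option (Int × Int)
  | [], best => best
  | (cur_path, last, tot) :: rest, best =>
    let succs := bridges.filter (fun t => decide (last ∈ t.2.1) && decide (t.1 ∉ cur_path))
    if succs = [] then
      let cand : Int × Int := ((cur_path.length : Int), tot)
      longest_bridge_alt_go bridges rest
        (match best with
          | none => some cand
          | some b => if cand.1 > b.1 ∨ (cand.1 = b.1 ∧ cand.2 > b.2) then some cand else some b)
    else
      longest_bridge_alt_go bridges
        (succs.map (fun t => (cur_path ++ [t.1], t.2.2 - last, tot + t.2.2)) ++ rest) best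
termination_by stack _ => lbMeasure bridges stack
decreasing_by
  · exact lbB_dec1 bridges cur_path last tot rest
  · exact lbB_dec2 bridges cur_path last tot rest

-- B's loop always records at least one terminal state, so the final best is never `none`;
-- the `none` branch below is an unreachable default required to totalize the match.
def longest_bridge_alt (bridges : List (Int × List Int × Int)) (path : Option (List Int))
    (last_pins : Int) (tot_pins : Int) : Int × Int :=
  match longest_bridge_alt_go bridges [(path.getD [], last_pins, tot_pins)] none with
  | some r => r
  | none => ((0 : Int), (0 : Int))

-- ===== PRECONDITION & SPEC =====
def Spec_longest_bridge (bridges : List (Int × List Int × Int)) (path : Option (List Int)) (last_pins : Int) (tot_pins : Int) (out : Int × Int) : Prop := out = longest_bridge_alt bridges path last_pins tot_pins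
instance (bridges : List (Int × List Int × Int)) (path : Option (List Int)) (last_pins : Int) (tot_pins : Int) (out : Int × Int) : Decidable (Spec_longest_bridge bridges path last_pins tot_pins out) := by unfold Spec_longest_bridge; infer_instance

-- ===== CLAIM (what is proved, stated in full; the proofs are below) =====
def Claim_equal_longest_bridge : Prop := ∀ (bridges : List (Int × List Int × Int)) (path : Option (List Int)) (last_pins : Int) (tot_pins : Int), Dom_longest_bridge bridges path last_pins tot_pins → Spec_longest_bridge bridges path last_pins tot_pins (longest_bridge bridges path last_pins tot_pins)

-- ===== LEMMAS AND PROOFS =====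

-- lexicographic max of two (length, strength) pairs, exactly A's accumulator update
def lexmax (a r : Int × Int) : Int × Int :=
  if r.1 > a.1 then r else if r.1 = a.1 then (a.1, max a.2 r.2) else a

-- B's optional-best update
def oupd (b : Option (Int × Int)) (r : Int × Int) : Option (Int × Int) :=
  match b with
  | none => some r
  | some a => some (lexmax a r)

theorem lexmax_assoc (a b c : Int × Int) : lexmax (lexmax a b) c = lexmax a (lexmax b c) := by
  rcases a with ⟨a1, a2⟩; rcases b with ⟨b1, b2⟩; rcases c with ⟨c1, c2⟩
  simp only [lexmax]
  split_ifs <;> simp_all [Prod.ext_iff] <;> omega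

theorem lexmax_fst_left (a r : Int × Int) : a.1 ≤ (lexmax a r).1 := by
  rcases a with ⟨a1, a2⟩; rcases r with ⟨r1, r2⟩
  simp only [lexmax]
  split_ifs <;> simp <;> omega

theorem lexmax_zero (r : Int × Int) (h : 0 < r.1) : lexmax (0, 0) r = r := by
  rcases r with ⟨r1, r2⟩
  simp only [lexmax]
  split_ifs <;> simp_all <;> omega

theorem lexmax_if (b c : Int × Int) :
    (if c.1 > b.1 ∨ (c.1 = b.1 ∧ c.2 > b.2) then some c else some b) = some (lexmax b c) := by
  rcases b with ⟨b1, b2⟩; rcases c with ⟨c1, c2⟩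
  simp only [lexmax]
  split_ifs <;> simp_all [Prod.ext_iff] <;> omega

theorem oupd_oupd (b : Option (Int × Int)) (a r : Int × Int) :
    oupd (oupd b a) r = oupd b (lexmax a r) := by
  cases b <;> simp [oupd, lexmax_assoc]

theorem foldl_oupd {α : Type} (f : α → Int × Int) (l : List α) (b : Option (Int × Int)) (a : Int × Int) :
    l.foldl (fun x t => oupd x (f t)) (oupd b a) = oupd b (l.foldl (fun x t => lexmax x (f t)) a) := by
  induction l generalizing a with
  | nil => rfl
  | cons t ts ih =>
    simp only [List.foldl_cons, oupd_oupd]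
    exact ih (lexmax a (f t))

theorem foldl_lexmax_fst_ge {α : Type} (f : α → Int × Int) (l : List α) (a : Int × Int) :
    a.1 ≤ (l.foldl (fun x t => lexmax x (f t)) a).1 := by
  induction l generalizing a with
  | nil => exact le_refl _
  | cons t ts ih =>
    simp only [List.foldl_cons]
    exact le_trans (lexmax_fst_left a (f t)) (ih (lexmax a (f t)))

-- unfolding of port A through `attach`, rephrased as a plain foldl of lexmax
theorem longest_bridge_rec_eq (bridges : List (Int × List Int × Int)) (path : List Int)
    (last_pins tot_pins : Int) :
    longest_bridge_rec bridges path last_pins tot_pins =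
      (let next := bridges.filter (fun t => decide (last_pins ∈ t.2.1) && decide (t.1 ∉ path))
       if next = [] then ((path.length : Int), tot_pins)
       else next.foldl (fun acc t =>
          lexmax acc (longest_bridge_rec bridges (path ++ [t.1]) (t.2.2 - last_pins) (tot_pins + t.2.2)))
          ((0 : Int), (0 : Int))) := by
  rw [longest_bridge_rec.eq_def]
  simp only [lexmax]
  rw [← List.foldl_attach
      (l := bridges.filter (fun t => decide (last_pins ∈ t.2.1) && decide (t.1 ∉ path)))
      (b := ((0 : Int), (0 : Int)))]

theorem longest_bridge_rec_fst_ge (n : Nat) (bridges : List (Int × List Int × Int))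
    (path : List Int) (last_pins tot_pins : Int) (hn : lbW bridges path ≤ n) :
    (path.length : Int) ≤ (longest_bridge_rec bridges path last_pins tot_pins).1 := by
  induction n generalizing path last_pins tot_pins with
  | zero =>
    rw [longest_bridge_rec_eq]
    set next := bridges.filter (fun t => decide (last_pins ∈ t.2.1) && decide (t.1 ∉ path)) with hnext
    by_cases hne : next = []
    · simp [hne]
    · exfalso
      obtain ⟨c, cs, hcc⟩ := List.exists_cons_of_ne_nil hne
      have hc : c ∈ next := by rw [hcc]; exact List.mem_cons_self
      rw [hnext, List.mem_filter, Bool.and_eq_true] at hc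
      have : lbW bridges (path ++ [c.1]) < lbW bridges path :=
        lbW_append_lt bridges path c hc.1 (by simpa using hc.2.2)
      omega
  | succ m ih =>
    rw [longest_bridge_rec_eq]
    set next := bridges.filter (fun t => decide (last_pins ∈ t.2.1) && decide (t.1 ∉ path)) with hnext
    by_cases hne : next = []
    · simp [hne]
    · simp only [hne, if_neg, reduceIte]
      obtain ⟨c, cs, hcc⟩ := List.exists_cons_of_ne_nil hne
      have hc : c ∈ next := by rw [hcc]; exact List.mem_cons_self
      rw [hnext, List.mem_filter, Bool.and_eq_true] at hc
      have hwlt : lbW bridges (path ++ [c.1]) < lbW bridges path :=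
        lbW_append_lt bridges path c hc.1 (by simpa using hc.2.2)
      have hchild : ((path ++ [c.1]).length : Int) ≤
          (longest_bridge_rec bridges (path ++ [c.1]) (c.2.2 - last_pins) (tot_pins + c.2.2)).1 :=
        ih (path ++ [c.1]) (c.2.2 - last_pins) (tot_pins + c.2.2) (by omega)
      have hlen : ((path ++ [c.1]).length : Int) = (path.length : Int) + 1 := by
        simp
      rw [hcc, List.foldl_cons]
      have hcpos : 0 < (longest_bridge_rec bridges (path ++ [c.1]) (c.2.2 - last_pins) (tot_pins + c.2.2)).1 := by
        have : (0 : Int) ≤ (path.length : Int) := Int.natCast_nonneg _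
        omega
      rw [lexmax_zero _ hcpos]
      have := foldl_lexmax_fst_ge
        (fun t : Int × List Int × Int =>
          longest_bridge_rec bridges (path ++ [t.1]) (t.2.2 - last_pins) (tot_pins + t.2.2)) cs
        (longest_bridge_rec bridges (path ++ [c.1]) (c.2.2 - last_pins) (tot_pins + c.2.2))
      omega

theorem lbMeasure_cons_pos (bridges : List (Int × List Int × Int)) (s : List Int × Int × Int)
    (rest : List (List Int × Int × Int)) :
    0 < lbMeasure bridges (s :: rest) := by
  have : 0 < lbFact bridges s := Nat.factorial_pos _
  simp only [lbMeasure, List.map_cons, List.sum_cons]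
  omega

-- main invariant: the iterative loop folds the recursive A over the stack
theorem longest_bridge_alt_go_eq (n : Nat) (bridges : List (Int × List Int × Int))
    (stack : List (List Int × Int × Int)) (best : Option (Int × Int))
    (hn : lbMeasure bridges stack ≤ n) :
    longest_bridge_alt_go bridges stack best =
      stack.foldl (fun b s => oupd b (longest_bridge_rec bridges s.1 s.2.1 s.2.2)) best := by
  induction n generalizing stack best with
  | zero =>
    cases stack with
    | nil => simp [longest_bridge_alt_go]
    | cons s rest =>
      exact absurd hn (by have := lbMeasure_cons_pos bridges s rest; omega)
  | succ m ih =>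
    cases stack with
    | nil => simp [longest_bridge_alt_go]
    | cons s rest =>
      obtain ⟨cur_path, last, tot⟩ := s
      rw [longest_bridge_alt_go]
      set succs := bridges.filter (fun t => decide (last ∈ t.2.1) && decide (t.1 ∉ cur_path)) with hsuccs
      have hfact : lbMeasure bridges ((cur_path, last, tot) :: rest) =
          Nat.factorial (lbW bridges cur_path + 1) + lbMeasure bridges rest := by
        simp [lbMeasure, lbFact]
      by_cases hne : succs = []
      · simp only [hne, reduceIte]
        have hrest : lbMeasure bridges rest ≤ m := by
          have : 0 < Nat.factorial (lbW bridges cur_path + 1) := Nat.factorial_pos _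
          omega
        rw [ih rest _ hrest]
        have hA : longest_bridge_rec bridges cur_path last tot = ((cur_path.length : Int), tot) := by
          rw [longest_bridge_rec_eq]
          simp only [← hsuccs, hne, reduceIte]
        rw [List.foldl_cons, hA]
        congr 1
        cases best with
        | none => rfl
        | some b => exact lexmax_if b ((cur_path.length : Int), tot)
      · simp only [hne, reduceIte]
        have hch := lb_children_lt bridges cur_path last tot
        rw [← hsuccs] at hch
        have hstack : lbMeasure bridges
            (succs.map (fun t => (cur_path ++ [t.1], t.2.2 - last, tot + t.2.2)) ++ rest) ≤ m := by
          have : lbMeasure bridges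
              (succs.map (fun t => (cur_path ++ [t.1], t.2.2 - last, tot + t.2.2)) ++ rest)
              = lbMeasure bridges (succs.map (fun t => (cur_path ++ [t.1], t.2.2 - last, tot + t.2.2)))
                + lbMeasure bridges rest := by
            simp [lbMeasure]
          omega
        rw [ih _ best hstack, List.foldl_append, List.foldl_cons]
        congr 1
        -- fold over the pushed children equals one oupd with A's node value
        rw [List.foldl_map]
        have hA : longest_bridge_rec bridges cur_path last tot =
            succs.foldl (fun acc t =>
              lexmax acc (longest_bridge_rec bridges (cur_path ++ [t.1]) (t.2.2 - last) (tot + t.2.2)))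
              ((0 : Int), (0 : Int)) := by
          rw [longest_bridge_rec_eq]
          simp only [← hsuccs, hne, reduceIte]
        obtain ⟨c, cs, hcc⟩ := List.exists_cons_of_ne_nil hne
        have hc : c ∈ succs := by rw [hcc]; exact List.mem_cons_self
        rw [hsuccs, List.mem_filter, Bool.and_eq_true] at hc
        have hcpos : 0 < (longest_bridge_rec bridges (cur_path ++ [c.1]) (c.2.2 - last) (tot + c.2.2)).1 := by
          have hge := longest_bridge_rec_fst_ge (lbW bridges (cur_path ++ [c.1]))
            bridges (cur_path ++ [c.1]) (c.2.2 - last) (tot + c.2.2) (le_refl _)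
          have : ((cur_path ++ [c.1]).length : Int) = (cur_path.length : Int) + 1 := by simp
          have : (0 : Int) ≤ (cur_path.length : Int) := Int.natCast_nonneg _
          omega
        rw [hA, hcc]
        simp only [List.foldl_cons]
        rw [lexmax_zero _ hcpos]
        have hfold := foldl_oupd
          (fun t : Int × List Int × Int =>
            longest_bridge_rec bridges (cur_path ++ [t.1]) (t.2.2 - last) (tot + t.2.2)) cs best
          (longest_bridge_rec bridges (cur_path ++ [c.1]) (c.2.2 - last) (tot + c.2.2))
        cases best with
        | none => simpa [oupd] using hfold
        | some b => simpa [oupd] using hfold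

-- ===== VERDICT (by name: the statement is the Claim_ definition above) =====
theorem longest_bridge_spec : Claim_equal_longest_bridge := by
  intro bridges path last_pins tot_pins _
  unfold Spec_longest_bridge longest_bridge longest_bridge_alt
  rw [longest_bridge_alt_go_eq (lbMeasure bridges [(path.getD [], last_pins, tot_pins)])
    bridges [(path.getD [], last_pins, tot_pins)] none (le_refl _)]
  rfl
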